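-- pv_equiv track=rewrite | github.com/lmngxn/Kattis-Solutions | a rational sequence.py | search
-- ===== SOURCE A (Python) =====
-- memo = dict()
--
-- def search(n):
--     if n == 1:
--         return 1, 1
--     if n % 2:
--         if n//2 not in memo:
--             memo[n//2] = search(n//2)
--         return sum(memo[n//2]), memo[n//2][1]
--     else:
--         if n//2 not in memo:
--             memo[n//2] = search(n//2)
--         return memo[n//2][0], sum(memo[n//2])
-- ===== SOURCE B (Python) =====
-- def search(n):
--     a = b = 1
--     for bit in bin(n)[3:]:
--         if bit == '1':
--             a += b
--         else:
--             b += a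
--     return a, b
-- ===== Notes on version B (the rewrite author's own statement) =====
-- stated objective: simpler
-- what changed: Replaced the recursion-plus-global-memo with a single iterative pass over n's binary digits (bin(n)[3:]), updating (a,b) per bit; the memo is dropped entirely.
-- outside the precondition, e.g. on search(0): A raises RecursionError, B returns (1, 1)
import Mathlib
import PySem

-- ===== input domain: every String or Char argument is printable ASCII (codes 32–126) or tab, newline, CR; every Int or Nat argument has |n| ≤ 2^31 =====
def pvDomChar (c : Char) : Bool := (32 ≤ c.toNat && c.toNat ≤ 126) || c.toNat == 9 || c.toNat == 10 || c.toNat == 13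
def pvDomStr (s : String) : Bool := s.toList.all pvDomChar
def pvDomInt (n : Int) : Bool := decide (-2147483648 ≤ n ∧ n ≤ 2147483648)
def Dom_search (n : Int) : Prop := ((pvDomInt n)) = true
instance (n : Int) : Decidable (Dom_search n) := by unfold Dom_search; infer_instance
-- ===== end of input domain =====

-- B replaces A's recursion-plus-global-memo by one iterative pass over n's binary digits (simpler; caching never changed outputs).


-- ===== PORT A =====
-- A's recursion, with fuel making the (for n ≥ 1 well-founded) recursion total; the memo is
-- pure caching (each branch reads exactly search(n//2)), so the port computes search(n//2) directly.
def searchGo : Nat → Int → Int × Int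
  | 0, _ => (1, 1)  -- unreachable for fuel ≥ n.toNat when n ≥ 1
  | fuel + 1, n =>
    if n = 1 then (1, 1)
    else if PySem.Int.mod n 2 ≠ 0 then
      let m := searchGo fuel (PySem.Int.floordiv n 2)
      (m.1 + m.2, m.2)
    else
      let m := searchGo fuel (PySem.Int.floordiv n 2)
      (m.1, m.1 + m.2)

def search (n : Int) : Int × Int := searchGo n.toNat n

-- ===== PORT B =====
-- binary digits of m, most significant first (port of Python's bin(m) for m ≥ 0, as a Bool list)
def binDigits (m : Nat) : List Bool :=
  if h : m = 0 then [] else binDigits (m / 2) ++ [decide (m % 2 = 1)]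
  decreasing_by exact Nat.div_lt_self (Nat.pos_of_ne_zero h) (by omega)

-- bin(n)[3:] drops '0b' and the leading 1-digit, i.e. drop 1 of binDigits
def search_alt (n : Int) : Int × Int :=
  ((binDigits n.toNat).drop 1).foldl
    (fun ab bit => if bit then (ab.1 + ab.2, ab.2) else (ab.1, ab.1 + ab.2)) (1, 1)

-- ===== PRECONDITION & SPEC =====
-- Pre_ excludes n ≤ 0, on which A recurses forever (RecursionError).
def Pre_search (n : Int) : Prop := 1 ≤ n
instance (n : Int) : Decidable (Pre_search n) := by unfold Pre_search; infer_instance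
def pvWitness_search : Int := 6

def Spec_search (n : Int) (out : Int × Int) : Prop := out = search_alt n
instance (n : Int) (out : Int × Int) : Decidable (Spec_search n out) := by unfold Spec_search; infer_instance

-- ===== CLAIM (what is proved, stated in full; the proofs are below) =====
def Claim_equal_search : Prop := ∀ (n : Int), Dom_search n → Pre_search n → Spec_search n (search n)

-- ===== LEMMAS AND PROOFS =====

def pvStep (ab : Int × Int) (bit : Bool) : Int × Int :=
  if bit then (ab.1 + ab.2, ab.2) else (ab.1, ab.1 + ab.2)

def pvF (m : Nat) : Int × Int := ((binDigits m).drop 1).foldl pvStep (1, 1)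

theorem search_alt_eq (n : Int) : search_alt n = pvF n.toNat := rfl

theorem binDigits_ne_nil {m : Nat} (h : m ≠ 0) : binDigits m ≠ [] := by
  rw [binDigits]; simp [h]

theorem binDigits_succ {m : Nat} (h : m ≠ 0) :
    binDigits m = binDigits (m / 2) ++ [decide (m % 2 = 1)] := by
  conv_lhs => rw [binDigits]
  simp [h]

theorem pvF_step {m : Nat} (h : 2 ≤ m) :
    pvF m = pvStep (pvF (m / 2)) (decide (m % 2 = 1)) := by
  have h2 : m ≠ 0 := by omega
  have h3 : m / 2 ≠ 0 := by omega
  unfold pvF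
  rw [binDigits_succ h2]
  rcases List.exists_cons_of_ne_nil (binDigits_ne_nil h3) with ⟨b, bs, hb⟩
  rw [hb]
  simp [List.foldl_append]

theorem searchGo_eq (fuel : Nat) (n : Int) (h1 : 1 ≤ n) (h2 : n.toNat ≤ fuel) :
    searchGo fuel n = pvF n.toNat := by
  induction fuel generalizing n with
  | zero => omega
  | succ fuel ih =>
    rw [searchGo]
    by_cases hn1 : n = 1
    · subst hn1
      have hb1 : binDigits 1 = [true] := by
        rw [binDigits_succ (by omega)]; rw [binDigits]; simp
      simp [pvF, hb1]
    · have hn2 : 2 ≤ n := by omega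
      have hfd : PySem.Int.floordiv n 2 = n / 2 := by
        exact PySem.Int.floordiv_eq_ediv_of_pos (by omega)
      have hd1 : 1 ≤ n / 2 := by omega
      have hdn : (n / 2).toNat = n.toNat / 2 := by omega
      have hrec := ih (n / 2) hd1 (by omega)
      have hstep := pvF_step (m := n.toNat) (by omega)
      have hmod : (PySem.Int.mod n 2 ≠ 0) ↔ (n.toNat % 2 = 1) := by
        rw [PySem.Int.mod_eq_emod_of_pos (by omega)]
        omega
      by_cases hodd : n.toNat % 2 = 1
      · rw [if_neg hn1, if_pos (hmod.mpr hodd)]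
        rw [hfd, hrec, hdn, hstep]
        simp [hodd, pvStep]
      · rw [if_neg hn1, if_neg (fun hc => hodd (hmod.mp hc))]
        rw [hfd, hrec, hdn, hstep]
        simp [pvStep, hodd]

-- ===== VERDICT (by name: the statement is the Claim_ definition above) =====
theorem search_spec : Claim_equal_search := by
  intro n _ hpre
  unfold Spec_search
  rw [search_alt_eq]
  unfold search
  exact searchGo_eq n.toNat n hpre le_rfl
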